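-- pv_equiv track=rewrite | github.com/TiderFang/FolderCloneTool | folderSyncTool.py | getdirname
-- ===== SOURCE A (Python) =====
-- def getdirname(targetdir):
-- 	id = 0
-- 	NotIN = 0
-- 	while True:
-- 		try:
-- 			if targetdir.find('\\') != -1:
-- 				id = targetdir.index('\\',id+1,len(targetdir))
-- 			else:
-- 				id = targetdir.index('/',id+1,len(targetdir))
-- 		except:
-- 			break
-- 	name = targetdir[id+1:len(targetdir)]
-- 	return name
-- ===== SOURCE B (Python) =====
-- def getdirname(targetdir):
-- 	if '\\' in targetdir:
-- 		idx = targetdir.rfind('\\')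
-- 	elif '/' in targetdir:
-- 		idx = targetdir.rfind('/')
-- 	else:
-- 		idx = 0
-- 	return targetdir[idx+1:]
-- ===== Notes on version B (the rewrite author's own statement) =====
-- stated objective: simpler
-- what changed: Replaces A's while-loop of repeated forward index() scans with a single branch on separator presence plus one rfind reverse scan (idx=0 preserving the no-separator [1:] behaviour).
import Mathlib
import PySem

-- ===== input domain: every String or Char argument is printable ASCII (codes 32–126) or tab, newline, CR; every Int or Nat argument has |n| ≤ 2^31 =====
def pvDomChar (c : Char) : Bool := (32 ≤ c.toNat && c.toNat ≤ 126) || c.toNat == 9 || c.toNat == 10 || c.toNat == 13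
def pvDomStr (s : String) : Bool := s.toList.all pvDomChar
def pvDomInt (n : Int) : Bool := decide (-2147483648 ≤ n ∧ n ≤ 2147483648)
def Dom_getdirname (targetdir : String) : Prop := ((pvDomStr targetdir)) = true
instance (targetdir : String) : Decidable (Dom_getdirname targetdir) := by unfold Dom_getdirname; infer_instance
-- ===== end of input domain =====

-- B replaces A's while-loop of repeated forward index() scans by one presence branch plus one rfind reverse scan (simpler).

-- ===== PORT A =====
-- A's `while True: try: … index(sep, id+1, len) … except: break` loop; the fuel argument
-- (called with s.length + 1) only makes the same computation total: each successful index()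
-- strictly increases id, so the fuel never runs out before the except-break fires.
def getdirnameLoop (s : List Char) (fuel : Nat) (id : Nat) : Nat :=
  match fuel with
  | 0 => id
  | fuel + 1 =>
    let r : Int :=
      if PySem.Chars.find s ['\\'] ≠ -1 then
        PySem.Chars.findFrom s ['\\'] ((id : Int) + 1) (some (s.length : Int))
      else
        PySem.Chars.findFrom s ['/'] ((id : Int) + 1) (some (s.length : Int))
    if r = -1 then id else getdirnameLoop s fuel r.toNat

def getdirname (targetdir : String) : String :=
  let s := targetdir.toList
  let id := getdirnameLoop s (s.length + 1) 0
  PySem.Str.slice targetdir (some ((id : Int) + 1)) (some (s.length : Int))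

-- ===== PORT B =====
def getdirname_alt (targetdir : String) : String :=
  let idx : Int :=
    if PySem.Str.isIn "\\" targetdir then PySem.Str.rfind targetdir "\\"
    else if PySem.Str.isIn "/" targetdir then PySem.Str.rfind targetdir "/"
    else 0
  PySem.Str.slice targetdir (some (idx + 1)) none

-- ===== PRECONDITION & SPEC =====
def Spec_getdirname (targetdir : String) (out : String) : Prop := out = getdirname_alt targetdir
instance (targetdir : String) (out : String) : Decidable (Spec_getdirname targetdir out) := by unfold Spec_getdirname; infer_instance

-- ===== CLAIM (what is proved, stated in full; the proofs are below) =====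
def Claim_equal_getdirname : Prop := ∀ (targetdir : String), Dom_getdirname targetdir → Spec_getdirname targetdir (getdirname targetdir)

-- ===== LEMMAS AND PROOFS =====

-- A's loop with the (per-string constant) separator choice factored out, and the
-- redundant `end = len(s)` bound replaced by the default.
def pvGenLoop (s : List Char) (sep : Char) (fuel : Nat) (id : Nat) : Nat :=
  match fuel with
  | 0 => id
  | fuel + 1 =>
    let r : Int := PySem.Chars.findFrom s [sep] ((id : Int) + 1) none
    if r = -1 then id else pvGenLoop s sep fuel r.toNat

lemma findFrom_some_len (s sub : List Char) (start : Int) :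
    PySem.Chars.findFrom s sub start (some (s.length : Int)) = PySem.Chars.findFrom s sub start none := by
  simp [PySem.Chars.findFrom, lt_self_iff_false, List.take_length, Int.toNat_natCast,
    show ¬((s.length : Int) < 0) from not_lt.mpr (Int.natCast_nonneg _)]

lemma slice_some_len (xs : List Char) (a : Option Int) :
    PySem.List.slice xs a (some (xs.length : Int)) = PySem.List.slice xs a none := by
  simp [PySem.List.slice]

lemma loop_eq_genLoop (s : List Char) (fuel id : Nat) :
    getdirnameLoop s fuel id =
      pvGenLoop s (if PySem.Chars.find s ['\\'] ≠ -1 then '\\' else '/') fuel id := by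
  induction fuel generalizing id with
  | zero => rfl
  | succ n ih =>
    by_cases hc : PySem.Chars.find s ['\\'] = -1 <;>
      simp [getdirnameLoop, pvGenLoop, hc, findFrom_some_len, ih]

lemma prefix_drop_infix {sub l : List Char} {j : Nat} (h : sub <+: l.drop j) : sub <:+: l :=
  List.infix_iff_prefix_suffix.mpr ⟨l.drop j, h, List.drop_suffix j l⟩

lemma prefix_drop_lt_length {sub : List Char} (hne : sub ≠ []) {j : Nat} {l : List Char}
    (hp : sub <+: l.drop j) : j < l.length := by
  by_contra hj
  rw [List.drop_eq_nil_of_le (by omega)] at hp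
  exact hne (List.prefix_nil.mp hp)

lemma infix_iff_exists_prefix_drop (sub s : List Char) :
    sub <:+: s ↔ ∃ j, sub <+: s.drop j := by
  rw [← PySem.Chars.isIn_iff_infix, ← PySem.Chars.exists_prefix_drop_iff_isIn]

-- rfind.go s sub m = the greatest position ≤ m where sub occurs, or -1
lemma rfind_go_spec (s sub : List Char) (m : Nat) :
    (PySem.Chars.rfind.go s sub m = -1 ∧ ∀ i, i ≤ m → ¬ sub <+: s.drop i) ∨
    (∃ g : Nat, PySem.Chars.rfind.go s sub m = (g : Int) ∧ g ≤ m ∧ sub <+: s.drop g ∧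
      ∀ i, g < i → i ≤ m → ¬ sub <+: s.drop i) := by
  induction m with
  | zero =>
    by_cases h : sub.isPrefixOf s
    · right
      exact ⟨0, by simp [PySem.Chars.rfind.go, h], le_refl 0,
        by simpa using List.isPrefixOf_iff_prefix.mp h, fun i h1 h2 => by omega⟩
    · left
      refine ⟨by simp [PySem.Chars.rfind.go, h], fun i hi => ?_⟩
      interval_cases i
      simpa [List.isPrefixOf_iff_prefix] using h
  | succ m ih =>
    by_cases h : sub.isPrefixOf (s.drop (m + 1))
    · right
      exact ⟨m + 1, by simp [PySem.Chars.rfind.go, h], le_refl _,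
        List.isPrefixOf_iff_prefix.mp h, fun i h1 h2 => by omega⟩
    · have hgo : PySem.Chars.rfind.go s sub (m + 1) = PySem.Chars.rfind.go s sub m := by
        simp [PySem.Chars.rfind.go, h]
      have hnp : ¬ sub <+: s.drop (m + 1) := by
        simpa [List.isPrefixOf_iff_prefix] using h
      rcases ih with ⟨he, hall⟩ | ⟨g, hge, hgm, hgp, hmax⟩
      · left
        refine ⟨hgo.trans he, fun i hi => ?_⟩
        rcases Nat.lt_or_ge i (m + 1) with h' | h'
        · exact hall i (by omega)
        · have : i = m + 1 := by omega
          exact this ▸ hnp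
      · right
        refine ⟨g, hgo.trans hge, by omega, hgp, fun i h1 h2 => ?_⟩
        rcases Nat.lt_or_ge i (m + 1) with h' | h'
        · exact hmax i h1 (by omega)
        · have : i = m + 1 := by omega
          exact this ▸ hnp

lemma rfind_spec_of_exists (s sub : List Char) (hne : sub ≠ [])
    (h : ∃ j, sub <+: s.drop j) :
    ∃ g : Nat, PySem.Chars.rfind s sub = (g : Int) ∧ sub <+: s.drop g ∧
      ∀ i, g < i → ¬ sub <+: s.drop i := by
  obtain ⟨j, hj⟩ := h
  have hjl : j < s.length := prefix_drop_lt_length hne hj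
  rcases rfind_go_spec s sub s.length with ⟨_, hall⟩ | ⟨g, hge, _, hgp, hmax⟩
  · exact absurd hj (hall j (by omega))
  · refine ⟨g, hge, hgp, fun i hi hp => ?_⟩
    have hil : i < s.length := prefix_drop_lt_length hne hp
    exact hmax i hi (by omega) hp

lemma genLoop_eq (s : List Char) (sep : Char) (g : Nat)
    (hg : [sep] <+: s.drop g) (hmax : ∀ i, g < i → ¬ [sep] <+: s.drop i) :
    ∀ fuel id, id ≤ g → s.length ≤ fuel + id → pvGenLoop s sep fuel id = g := by
  intro fuel
  induction fuel with
  | zero =>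
    intro id hid hlen
    have := prefix_drop_lt_length (by simp) hg
    omega
  | succ n ih =>
    intro id hid hlen
    have hglt : g < s.length := prefix_drop_lt_length (by simp) hg
    have hk : id + 1 ≤ s.length := by omega
    have hcast : ((id : Int) + 1) = ((id + 1 : Nat) : Int) := by push_cast; ring
    show (if PySem.Chars.findFrom s [sep] ((id : Int) + 1) none = -1 then id
          else pvGenLoop s sep n (PySem.Chars.findFrom s [sep] ((id : Int) + 1) none).toNat) = g
    rw [hcast]
    by_cases hr : PySem.Chars.findFrom s [sep] ((id + 1 : Nat) : Int) none = -1
    · rw [if_pos hr]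
      rcases Nat.lt_or_ge id g with hlt | _
      · exfalso
        have hpref : [sep] <+: (s.drop (id + 1)).drop (g - (id + 1)) := by
          rw [List.drop_drop, show id + 1 + (g - (id + 1)) = g by omega]
          exact hg
        have : [sep] <:+: s.drop (id + 1) := prefix_drop_infix hpref
        exact ((PySem.Chars.findFrom_natCast_eq_neg_one_iff s [sep] (id + 1) hk).mp hr) this
      · omega
    · rw [if_neg hr]
      obtain ⟨hle, hpref, -⟩ := PySem.Chars.findFrom_natCast_spec s [sep] (id + 1) hk hr
      have h1 : id + 1 ≤ (PySem.Chars.findFrom s [sep] ((id + 1 : Nat) : Int) none).toNat := by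
        omega
      have h2 : (PySem.Chars.findFrom s [sep] ((id + 1 : Nat) : Int) none).toNat ≤ g := by
        by_contra hgt
        exact hmax _ (by omega) hpref
      exact ih _ h2 (by omega)

lemma genLoop_zero_of_not_infix (s : List Char) (sep : Char)
    (h : ¬ ([sep] : List Char) <:+: s) (fuel : Nat) :
    pvGenLoop s sep (fuel + 1) 0 = 0 := by
  have hr : PySem.Chars.findFrom s [sep] ((0 : Int) + 1) none = -1 := by
    rcases Nat.eq_zero_or_pos s.length with h0 | h1
    · rw [List.length_eq_zero_iff.mp h0]
      simp [PySem.Chars.findFrom]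
    · have : ((0 : Int) + 1) = ((1 : Nat) : Int) := by norm_num
      rw [this, PySem.Chars.findFrom_natCast_eq_neg_one_iff s [sep] 1 h1]
      intro hinf
      exact h (hinf.trans (List.drop_suffix 1 s).isInfix)
  show (if PySem.Chars.findFrom s [sep] ((0 : Int) + 1) none = -1 then 0
        else pvGenLoop s sep fuel (PySem.Chars.findFrom s [sep] ((0 : Int) + 1) none).toNat) = 0
  rw [if_pos hr]

-- ===== VERDICT (by name: the statement is the Claim_ definition above) =====
theorem getdirname_spec : Claim_equal_getdirname := by
  intro t _
  unfold Spec_getdirname getdirname getdirname_alt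
  simp only []
  apply String.toList_inj.mp
  set s := t.toList with hs
  rw [loop_eq_genLoop]
  by_cases hb : PySem.Chars.find s ['\\'] = -1
  · -- no backslash anywhere
    have hbinf : ¬ (['\\'] : List Char) <:+: s := (PySem.Chars.find_eq_neg_one_iff s ['\\']).mp hb
    have hbIn : PySem.Chars.isIn ['\\'] s = false := by
      rw [PySem.Chars.isIn_eq_false_iff]; exact hbinf
    by_cases hsl : PySem.Chars.find s ['/'] = -1
    · -- no slash either: A's loop breaks at once with id = 0, B takes idx = 0
      have hsinf : ¬ (['/'] : List Char) <:+: s := (PySem.Chars.find_eq_neg_one_iff s ['/']).mp hsl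
      have hsIn : PySem.Chars.isIn ['/'] s = false := by
        rw [PySem.Chars.isIn_eq_false_iff]; exact hsinf
      rw [if_neg (by simp [hb])]
      rw [genLoop_zero_of_not_infix s '/' hsinf s.length]
      simp [PySem.Str.slice, ← hs, hbIn, hsIn, slice_some_len]
    · -- slash present, no backslash: both end at the last '/'
      have hsinf : (['/'] : List Char) <:+: s := (PySem.Chars.find_ne_neg_one_iff s ['/']).mp hsl
      have hsIn : PySem.Chars.isIn ['/'] s = true := by
        rw [PySem.Chars.isIn_iff_infix]; exact hsinf
      obtain ⟨g, hge, hgp, hmax⟩ :=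
        rfind_spec_of_exists s ['/'] (by simp)
          ((infix_iff_exists_prefix_drop ['/'] s).mp hsinf)
      rw [if_neg (by simp [hb])]
      rw [genLoop_eq s '/' g hgp hmax (s.length + 1) 0 (Nat.zero_le g) (by omega)]
      simp [PySem.Str.slice, ← hs, hbIn, hsIn, hge, slice_some_len]
  · -- backslash present: both end at the last '\\'
    have hbinf : (['\\'] : List Char) <:+: s := (PySem.Chars.find_ne_neg_one_iff s ['\\']).mp hb
    have hbIn : PySem.Chars.isIn ['\\'] s = true := by
      rw [PySem.Chars.isIn_iff_infix]; exact hbinf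
    obtain ⟨g, hge, hgp, hmax⟩ :=
      rfind_spec_of_exists s ['\\'] (by simp)
        ((infix_iff_exists_prefix_drop ['\\'] s).mp hbinf)
    rw [if_pos (by simp [hb])]
    rw [genLoop_eq s '\\' g hgp hmax (s.length + 1) 0 (Nat.zero_le g) (by omega)]
    simp [PySem.Str.slice, ← hs, hbIn, hge, slice_some_len]
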